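-- pv_equiv track=rewrite | github.com/KappaDistributive/advent_of_code | python/2023/day_15.py | part_two
-- ===== SOURCE A (Python) =====
-- from collections import defaultdict
--
-- def hash_value(s: str) -> int:
--     current = 0
--     for char in s:
--         current += ord(char)
--         current *= 17
--         current %= 256
--     return current
--
-- def part_two(steps: list[str]) -> int:
--     boxes = defaultdict(dict)
--
--     for step in steps:
--         if "-" in step:
--             label = step[:-1]
--             box_id = hash_value(label)
--             if label in boxes[box_id]:
--                 del boxes[box_id][label]
--         elif "=" in step:
--             label, focal_length = step.split("=")
--             box_id = hash_value(label)
--             boxes[box_id][label] = int(focal_length)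
--
--     total = 0
--     for box_id, lenses in boxes.items():
--         for slot, (label, focal_length) in enumerate(lenses.items(), 1):
--             focusing_power = (box_id + 1) * slot * focal_length
--             total += focusing_power
--
--     return total
-- ===== SOURCE B (Python) =====
-- def hash_value(s: str) -> int:
--     current = 0
--     for char in s:
--         current += ord(char)
--         current *= 17
--         current %= 256
--     return current
--
-- def part_two(steps: list[str]) -> int:
--     # One flat insertion-ordered dict of all lenses; boxes are never materialized.
--     # Within a box, lens order equals global insertion order filtered to that box,
--     # because dict overwrite keeps position and a label always hashes to the same box.
--     lenses = {}
--     for step in steps: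
--         if "-" in step:
--             lenses.pop(step[:-1], None)
--         elif "=" in step:
--             label, focal = step.split("=")
--             lenses[label] = int(focal)
--
--     total = 0
--     counts = [0] * 256
--     for label, focal_length in lenses.items():
--         box_id = hash_value(label)
--         counts[box_id] += 1
--         total += (box_id + 1) * counts[box_id] * focal_length
--     return total
-- ===== Notes on version B (the rewrite author's own statement) =====
-- stated objective: simpler
-- what changed: Replaces A's defaultdict of 256 per-box ordered dicts (hashing every step) with one flat insertion-ordered dict of all lenses updated by plain assignment/pop, then recovers box and slot numbers in a single final counting pass that hashes each surviving lens once.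
import Mathlib
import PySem

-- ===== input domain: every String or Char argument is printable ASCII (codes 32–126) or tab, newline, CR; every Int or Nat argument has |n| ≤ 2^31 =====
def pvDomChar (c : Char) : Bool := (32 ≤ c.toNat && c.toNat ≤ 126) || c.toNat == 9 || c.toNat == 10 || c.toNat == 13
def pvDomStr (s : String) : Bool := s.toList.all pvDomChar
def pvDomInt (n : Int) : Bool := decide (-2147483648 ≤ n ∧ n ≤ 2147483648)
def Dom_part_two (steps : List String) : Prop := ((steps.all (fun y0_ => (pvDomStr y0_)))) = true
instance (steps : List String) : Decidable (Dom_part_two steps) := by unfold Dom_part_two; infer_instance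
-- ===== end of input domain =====

-- B drops A's 256 per-box dicts: it maintains ONE flat insertion-ordered dict of all lenses
-- (no hashing during processing) and reconstructs box/slot structure in a single counting pass
-- at the end (objective: simpler; return value only).

-- ===== PORT A =====
-- shared module helper: hash_value (current += ord; current *= 17; current %= 256)
def hash_value (s : String) : Int :=
  s.toList.foldl (fun current char => PySem.Int.mod ((current + (char.toNat : Int)) * 17) 256) 0

-- one iteration of A's loop over steps
def pvStepA (boxes : PySem.Dict Int (PySem.Dict String Int)) (step : String) :
    PySem.Dict Int (PySem.Dict String Int) :=
  if PySem.Str.isIn "-" step then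
    let label := PySem.Str.slice step none (some (-1))
    let box_id := hash_value label
    -- defaultdict: reading boxes[box_id] inserts an empty dict if the key is missing
    let boxes1 := boxes.setdefault box_id PySem.Dict.empty
    if (boxes1.getD box_id PySem.Dict.empty).contains label then
      boxes1.insert box_id ((boxes1.getD box_id PySem.Dict.empty).erase label)
    else boxes1
  else if PySem.Str.isIn "=" step then
    match PySem.Str.split? step "=" with
    | some [label, focal_length] =>
      match PySem.Int.ofStr? focal_length with
      | some v =>
        let box_id := hash_value label
        let boxes1 := boxes.setdefault box_id PySem.Dict.empty
        boxes1.insert box_id ((boxes1.getD box_id PySem.Dict.empty).insert label v)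
      | none => boxes   -- int() raises ValueError: excluded by Pre_
    | _ => boxes        -- unpacking raises ValueError: excluded by Pre_
  else boxes

def part_two (steps : List String) : Int :=
  let boxes := steps.foldl pvStepA PySem.Dict.empty
  boxes.items.foldl (fun total p =>
    (p.2.items.foldl
      (fun (st : Int × Int) q => (st.1 + (p.1 + 1) * st.2 * q.2, st.2 + 1))
      (total, 1)).1) 0

-- ===== PORT B =====
-- one iteration of B's loop: one flat dict keyed by label; pop(label, None) is Dict.erase
def pvStepB (lenses : PySem.Dict String Int) (step : String) : PySem.Dict String Int :=
  if PySem.Str.isIn "-" step then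
    lenses.erase (PySem.Str.slice step none (some (-1)))
  else if PySem.Str.isIn "=" step then
    match PySem.Str.split? step "=" with
    | some [label, focal] =>
      match PySem.Int.ofStr? focal with
      | some fl => lenses.insert label fl
      | none => lenses   -- int() raises ValueError: excluded by Pre_
    | _ => lenses        -- unpacking raises ValueError: excluded by Pre_
  else lenses

-- final pass: hash each surviving lens once; counts[b] is its slot; hash is in [0,256) so
-- .toNat indexing of the counts list is exact
def part_two_alt (steps : List String) : Int :=
  let lenses := steps.foldl pvStepB PySem.Dict.empty
  (lenses.items.foldl
    (fun (st : Int × List Int) p =>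
      let b := hash_value p.1
      let c := st.2.getD b.toNat 0 + 1
      (st.1 + (b + 1) * c * p.2, st.2.set b.toNat c))
    (0, List.replicate 256 0)).1

-- ===== PRECONDITION & SPEC =====
-- Pre_ excludes exactly the steps on which both Pythons raise ValueError: a step without '-'
-- whose '=' split does not have exactly two parts, or whose focal part is not a valid int literal.
def pvOkStep (s : String) : Bool :=
  if PySem.Str.isIn "-" s then true
  else if PySem.Str.isIn "=" s then
    match PySem.Str.split? s "=" with
    | some [_, focal] => (PySem.Int.ofStr? focal).isSome
    | _ => false
  else true

def Pre_part_two (steps : List String) : Prop := steps.all pvOkStep = true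
instance (steps : List String) : Decidable (Pre_part_two steps) := by unfold Pre_part_two; infer_instance

def pvWitness_part_two : List String := ["rn=1", "cm-", "qp=3", "cm=2", "qp-", "pc=4"]

def Spec_part_two (steps : List String) (out : Int) : Prop := out = part_two_alt steps
instance (steps : List String) (out : Int) : Decidable (Spec_part_two steps out) := by unfold Spec_part_two; infer_instance

-- ===== CLAIM (what is proved, stated in full; the proofs are below) =====
def Claim_equal_part_two : Prop := ∀ (steps : List String), Dom_part_two steps → Pre_part_two steps → Spec_part_two steps (part_two steps)

-- ===== LEMMAS AND PROOFS =====

theorem part_two_witness_ok : Dom_part_two pvWitness_part_two ∧ Pre_part_two pvWitness_part_two := by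
  constructor <;> decide

-- hash_value always lies in [0, 256)
theorem pvHash_aux (cs : List Char) : ∀ (c : Int), 0 ≤ c → c < 256 →
    0 ≤ cs.foldl (fun current char => PySem.Int.mod ((current + (char.toNat : Int)) * 17) 256) c ∧
    cs.foldl (fun current char => PySem.Int.mod ((current + (char.toNat : Int)) * 17) 256) c < 256 := by
  induction cs with
  | nil => intro c h1 h2; exact ⟨h1, h2⟩
  | cons x xs ih =>
      intro c h1 h2
      exact ih _ (PySem.Int.mod_nonneg _ (by norm_num)) (PySem.Int.mod_lt _ (by norm_num))

theorem pvHash_nonneg (s : String) : 0 ≤ hash_value s :=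
  (pvHash_aux s.toList 0 (by norm_num) (by norm_num)).1

theorem pvHash_lt (s : String) : hash_value s < 256 :=
  (pvHash_aux s.toList 0 (by norm_num) (by norm_num)).2

-- Dict.erase is a filter on the items list (definitional in PySem)
theorem pvItems_erase (d : PySem.Dict String Int) (k : String) :
    (d.erase k).items = d.items.filter (fun p => !(p.1 == k)) := rfl

-- the box with id b, extracted from the flat lens list
def pvBoxOf (b : Int) (xs : List (String × Int)) : List (String × Int) :=
  xs.filter (fun p => hash_value p.1 == b)

-- removing a label commutes with extracting the label's own box …
theorem pvBoxOf_del_self (label : String) (xs : List (String × Int)) :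
    pvBoxOf (hash_value label) (xs.filter (fun p => !(p.1 == label)))
      = (pvBoxOf (hash_value label) xs).filter (fun p => !(p.1 == label)) := by
  simp only [pvBoxOf, List.filter_filter]
  congr 1
  funext p
  rw [Bool.and_comm]

-- … and is invisible to every other box
theorem pvBoxOf_del_other (label : String) (b : Int) (hb : b ≠ hash_value label)
    (xs : List (String × Int)) :
    pvBoxOf b (xs.filter (fun p => !(p.1 == label))) = pvBoxOf b xs := by
  simp only [pvBoxOf, List.filter_filter]
  congr 1
  funext p
  by_cases h : p.1 = label
  · have hne : (hash_value p.1 == b) = false := by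
      rw [h]; exact beq_eq_false_iff_ne.mpr (fun he => hb he.symm)
    simp [hne]
  · simp [h]

-- a label is a key of its own box iff it is a key of the flat dict
theorem pvMem_boxOf_keys (label : String) (xs : List (String × Int)) :
    label ∈ (pvBoxOf (hash_value label) xs).map Prod.fst ↔ label ∈ xs.map Prod.fst := by
  constructor
  · intro h
    rcases List.mem_map.mp h with ⟨p, hp, hk⟩
    exact List.mem_map.mpr ⟨p, List.mem_of_mem_filter hp, hk⟩
  · intro h
    rcases List.mem_map.mp h with ⟨p, hp, hk⟩
    refine List.mem_map.mpr ⟨p, List.mem_filter.mpr ⟨hp, ?_⟩, hk⟩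
    simp [hk]

-- in-place replacement (dict overwrite) commutes with extracting any box
theorem pvBoxOf_repl (label : String) (v : Int) (b : Int) (xs : List (String × Int)) :
    pvBoxOf b (xs.map (fun p => if p.1 == label then (label, v) else p))
      = (pvBoxOf b xs).map (fun p => if p.1 == label then (label, v) else p) := by
  simp only [pvBoxOf]
  rw [List.filter_map]
  congr 1
  apply List.filter_congr
  intro p _
  by_cases h : p.1 = label
  · simp [h]
  · simp [h]

-- appending a fresh lens lands in exactly its own box
theorem pvBoxOf_append_self (label : String) (v : Int) (xs : List (String × Int)) :
    pvBoxOf (hash_value label) (xs ++ [(label, v)])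
      = pvBoxOf (hash_value label) xs ++ [(label, v)] := by
  simp [pvBoxOf, List.filter_append]

theorem pvBoxOf_append_other (label : String) (v : Int) (b : Int) (hb : b ≠ hash_value label)
    (xs : List (String × Int)) :
    pvBoxOf b (xs ++ [(label, v)]) = pvBoxOf b xs := by
  have hne : (hash_value label == b) = false := beq_eq_false_iff_ne.mpr (fun he => hb he.symm)
  simp [pvBoxOf, List.filter_append, hne]

-- the loop invariant: A's boxes are exactly B's flat dict partitioned by hash
def pvInv (d : PySem.Dict Int (PySem.Dict String Int)) (g : PySem.Dict String Int) : Prop :=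
  d.keys.Nodup ∧ (∀ k ∈ d.keys, ∃ i : Nat, i < 256 ∧ k = (i : Int)) ∧
  (∀ b : Int, (d.getD b PySem.Dict.empty).items = pvBoxOf b g.items)

-- setdefault bookkeeping on A's outer dict
theorem pvSetdefault_facts (d : PySem.Dict Int (PySem.Dict String Int)) (b : Int)
    (hnd : d.keys.Nodup) :
    (d.setdefault b PySem.Dict.empty).keys.Nodup ∧
    (∀ k ∈ (d.setdefault b PySem.Dict.empty).keys, k = b ∨ k ∈ d.keys) ∧
    (d.setdefault b PySem.Dict.empty).contains b = true ∧
    (d.setdefault b PySem.Dict.empty).getD b PySem.Dict.empty = d.getD b PySem.Dict.empty ∧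
    (∀ k : Int, k ≠ b →
      (d.setdefault b PySem.Dict.empty).getD k PySem.Dict.empty = d.getD k PySem.Dict.empty) := by
  refine ⟨?_, ?_, ?_, PySem.Dict.getD_setdefault_self d _ _ _, ?_⟩
  · by_cases hc : d.contains b = true
    · rw [PySem.Dict.setdefault_of_contains d _ hc]; exact hnd
    · rw [PySem.Dict.setdefault_of_not_contains d _ (Bool.eq_false_iff.mpr hc)]
      exact PySem.Dict.nodup_keys_insert d _ _ hnd
  · intro k hk
    by_cases hc : d.contains b = true
    · rw [PySem.Dict.setdefault_of_contains d _ hc] at hk; exact Or.inr hk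
    · rw [PySem.Dict.setdefault_of_not_contains d _ (Bool.eq_false_iff.mpr hc)] at hk
      exact (PySem.Dict.mem_keys_insert d _ k _).mp hk
  · by_cases hc : d.contains b = true
    · rw [PySem.Dict.setdefault_of_contains d _ hc]; exact hc
    · rw [PySem.Dict.setdefault_of_not_contains d _ (Bool.eq_false_iff.mpr hc)]
      exact PySem.Dict.contains_insert_self d _ _
  · intro k hk
    rw [PySem.Dict.getD_eq_get?_getD, PySem.Dict.get?_setdefault_of_ne d _ hk,
      ← PySem.Dict.getD_eq_get?_getD]

-- keys bookkeeping after A writes box b (setdefault then insert at the same key b)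
theorem pvKeys_after_write (d : PySem.Dict Int (PySem.Dict String Int)) (b : Int)
    (hnd : d.keys.Nodup) (hrange : ∀ k ∈ d.keys, ∃ i : Nat, i < 256 ∧ k = (i : Int))
    (hb0 : 0 ≤ b) (hb1 : b < 256) (box : PySem.Dict String Int) :
    ((d.setdefault b PySem.Dict.empty).insert b box).keys.Nodup ∧
    (∀ k ∈ ((d.setdefault b PySem.Dict.empty).insert b box).keys,
      ∃ i : Nat, i < 256 ∧ k = (i : Int)) := by
  obtain ⟨h1, h2, h3, _, _⟩ := pvSetdefault_facts d b hnd
  rw [PySem.Dict.keys_insert_of_contains _ _ h3]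
  refine ⟨h1, ?_⟩
  intro k hk
  rcases h2 k hk with rfl | hk'
  · exact ⟨k.toNat, by omega, (Int.toNat_of_nonneg hb0).symm⟩
  · exact hrange k hk'

theorem pvStep_preserves (s : String) (d : PySem.Dict Int (PySem.Dict String Int))
    (g : PySem.Dict String Int) (h : pvInv d g) : pvInv (pvStepA d s) (pvStepB g s) := by
  obtain ⟨hnd, hrange, hbox⟩ := h
  simp only [pvStepA, pvStepB]
  by_cases h1 : PySem.Str.isIn "-" s = true
  · rw [if_pos h1, if_pos h1]
    set label := PySem.Str.slice s none (some (-1)) with hlab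
    set b := hash_value label with hb
    have hb0 : 0 ≤ b := by rw [hb]; exact pvHash_nonneg label
    have hb1 : b < 256 := by rw [hb]; exact pvHash_lt label
    obtain ⟨f1, f2, f3, f4, f5⟩ := pvSetdefault_facts d b hnd
    have hkeys := pvKeys_after_write d b hnd hrange (pvHash_nonneg label) (pvHash_lt label)
    by_cases hc : ((d.setdefault b PySem.Dict.empty).getD b PySem.Dict.empty).contains label = true
    · rw [if_pos hc]
      refine ⟨(hkeys _).1, (hkeys _).2, ?_⟩
      intro b'
      rw [pvItems_erase]
      by_cases hbb : b' = b
      · subst hbb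
        rw [PySem.Dict.getD_insert, if_pos rfl, f4, pvItems_erase, hbox b, hb,
          pvBoxOf_del_self]
      · rw [PySem.Dict.getD_insert, if_neg hbb, f5 b' hbb, hbox b',
          pvBoxOf_del_other label b' (hb ▸ hbb) g.items]
    · rw [if_neg hc]
      refine ⟨f1, fun k hk => ?_, ?_⟩
      · rcases f2 k hk with rfl | hk'
        · exact ⟨b.toNat, by omega, (Int.toNat_of_nonneg hb0).symm⟩
        · exact hrange k hk'
      · intro b'
        rw [f4] at hc
        have hnm : label ∉ g.items.map Prod.fst := by
          intro hm
          apply hc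
          rw [PySem.Dict.contains_iff_mem_keys]
          have : label ∈ (pvBoxOf b g.items).map Prod.fst := (pvMem_boxOf_keys label g.items).mpr hm
          rw [← hbox b] at this
          exact this
        have hid : g.items.filter (fun p => !(p.1 == label)) = g.items := by
          apply List.filter_eq_self.mpr
          intro p hp
          simp only [Bool.not_eq_eq_eq_not, Bool.not_true, beq_eq_false_iff_ne, ne_eq]
          intro he
          exact hnm (List.mem_map.mpr ⟨p, hp, he⟩)
        rw [pvItems_erase, hid]
        by_cases hbb : b' = b
        · subst hbb; rw [f4, hbox b]
        · rw [f5 b' hbb, hbox b']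
  · rw [if_neg h1, if_neg h1]
    by_cases h2 : PySem.Str.isIn "=" s = true
    · rw [if_pos h2, if_pos h2]
      cases hq : PySem.Str.split? s "=" with
      | none => exact ⟨hnd, hrange, hbox⟩
      | some parts =>
        cases parts with
        | nil => exact ⟨hnd, hrange, hbox⟩
        | cons x t =>
          cases t with
          | nil => exact ⟨hnd, hrange, hbox⟩
          | cons y t2 =>
            cases t2 with
            | cons z t3 => exact ⟨hnd, hrange, hbox⟩
            | nil =>
              dsimp only
              cases hf : PySem.Int.ofStr? y with
              | none => exact ⟨hnd, hrange, hbox⟩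
              | some v =>
                set b := hash_value x with hb
                have hb0 : 0 ≤ b := by rw [hb]; exact pvHash_nonneg x
                have hb1 : b < 256 := by rw [hb]; exact pvHash_lt x
                obtain ⟨f1, f2, f3, f4, f5⟩ := pvSetdefault_facts d b hnd
                have hkeys := pvKeys_after_write d b hnd hrange (pvHash_nonneg x) (pvHash_lt x)
                refine ⟨(hkeys _).1, (hkeys _).2, ?_⟩
                intro b'
                -- the two contains tests agree
                have hcc : (d.getD b PySem.Dict.empty).contains x = g.contains x := by
                  rw [PySem.Dict.contains_eq_decide_mem_keys, PySem.Dict.contains_eq_decide_mem_keys]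
                  congr 1
                  show (x ∈ (d.getD b PySem.Dict.empty).items.map Prod.fst) = _
                  rw [hbox b]
                  exact propext (pvMem_boxOf_keys x g.items)
                by_cases hbb : b' = b
                · subst hbb
                  rw [PySem.Dict.getD_insert, if_pos rfl, f4,
                    PySem.Dict.items_insert, PySem.Dict.items_insert, hcc]
                  by_cases hg : g.contains x = true
                  · rw [if_pos hg, if_pos hg, hbox b, pvBoxOf_repl]
                  · rw [if_neg hg, if_neg hg, hbox b, hb, pvBoxOf_append_self]
                · rw [PySem.Dict.getD_insert, if_neg hbb, f5 b' hbb, hbox b',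
                    PySem.Dict.items_insert]
                  by_cases hg : g.contains x = true
                  · rw [if_pos hg, pvBoxOf_repl]
                    have hnm : x ∉ (pvBoxOf b' g.items).map Prod.fst := by
                      intro hm
                      rcases List.mem_map.mp hm with ⟨p, hp, hk⟩
                      have := (List.mem_filter.mp hp).2
                      rw [hk] at this
                      exact hbb (beq_iff_eq.mp this).symm
                    have hfix : ∀ p ∈ pvBoxOf b' g.items,
                        (fun p : String × Int => if p.1 == x then (x, v) else p) p = id p := by
                      intro p hp
                      have : ¬ p.1 = x := fun he => hnm (List.mem_map.mpr ⟨p, hp, he⟩)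
                      simp [this]
                    rw [List.map_congr_left hfix, List.map_id]
                  · rw [if_neg hg, pvBoxOf_append_other x v b' (hb ▸ hbb)]
    · rw [if_neg h2, if_neg h2]; exact ⟨hnd, hrange, hbox⟩

theorem pvInv_foldl (steps : List String) :
    ∀ (d : PySem.Dict Int (PySem.Dict String Int)) (g : PySem.Dict String Int),
    pvInv d g → pvInv (steps.foldl pvStepA d) (steps.foldl pvStepB g) := by
  induction steps with
  | nil => intro d g h; exact h
  | cons s rest ih => intro d g h; exact ih _ _ (pvStep_preserves s d g h)

theorem pvInv_init : pvInv PySem.Dict.empty PySem.Dict.empty := by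
  refine ⟨by simp [PySem.Dict.keys_empty], by simp [PySem.Dict.keys_empty], ?_⟩
  intro b
  rw [PySem.Dict.getD_empty]
  rfl

-- the focusing-power sum of one box starting at a given slot, written recursively
def pvSsum (b slot : Int) (items : List (String × Int)) : Int :=
  match items with
  | [] => 0
  | q :: rest => (b + 1) * slot * q.2 + pvSsum b (slot + 1) rest

theorem pvSsum_innerA (b : Int) (items : List (String × Int)) : ∀ (t slot : Int),
    (items.foldl (fun (st : Int × Int) q => (st.1 + (b + 1) * st.2 * q.2, st.2 + 1)) (t, slot)).1
      = t + pvSsum b slot items := by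
  induction items with
  | nil => intro t slot; simp [pvSsum]
  | cons q rest ih =>
      intro t slot
      rw [List.foldl_cons, pvSsum, ih]
      ring

theorem pvOuterA (ps : List (Int × PySem.Dict String Int)) : ∀ (t : Int),
    ps.foldl (fun total p =>
        (p.2.items.foldl (fun (st : Int × Int) q => (st.1 + (p.1 + 1) * st.2 * q.2, st.2 + 1))
          (total, 1)).1) t
      = t + (ps.map (fun p => pvSsum p.1 1 p.2.items)).sum := by
  induction ps with
  | nil => intro t; simp
  | cons p rest ih =>
      intro t
      rw [List.foldl_cons, List.map_cons, List.sum_cons, pvSsum_innerA, ih]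
      ring

-- A's sum over its (insertion-ordered, unique, in-range) box ids, reindexed over range 256
theorem pvKeysSum (d : PySem.Dict Int (PySem.Dict String Int)) (g : PySem.Dict String Int)
    (h : pvInv d g) :
    (d.items.map (fun p => pvSsum p.1 1 p.2.items)).sum
      = ∑ j ∈ Finset.range 256, pvSsum ((j : Nat) : Int) 1 (pvBoxOf ((j : Nat) : Int) g.items) := by
  obtain ⟨hnd, hrange, hbox⟩ := h
  rw [PySem.Dict.items_eq_map_keys d hnd PySem.Dict.empty, List.map_map]
  have hfun : ((fun p : Int × PySem.Dict String Int => pvSsum p.1 1 p.2.items) ∘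
      fun k => (k, d.getD k PySem.Dict.empty))
      = fun k : Int => pvSsum k 1 (d.getD k PySem.Dict.empty).items := rfl
  rw [hfun, ← List.sum_toFinset _ hnd]
  have hsub : d.keys.toFinset ⊆ (Finset.range 256).image (fun i : Nat => (i : Int)) := by
    intro k hk
    rcases hrange k (List.mem_toFinset.mp hk) with ⟨i, hi, rfl⟩
    exact Finset.mem_image.mpr ⟨i, Finset.mem_range.mpr hi, rfl⟩
  have hzero : ∀ k ∈ (Finset.range 256).image (fun i : Nat => (i : Int)),
      k ∉ d.keys.toFinset → (fun k : Int => pvSsum k 1 (d.getD k PySem.Dict.empty).items) k = 0 := by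
    intro k _ hk
    have hc : d.contains k = false :=
      Bool.eq_false_iff.mpr (fun hx => (fun hxm => hk (List.mem_toFinset.mpr hxm))
        ((PySem.Dict.contains_iff_mem_keys d k).mp hx))
    show pvSsum k 1 (d.getD k PySem.Dict.empty).items = 0
    rw [PySem.Dict.getD_of_not_contains d _ hc]
    rfl
  rw [Finset.sum_subset hsub hzero,
    Finset.sum_image (fun a _ c _ hac => Nat.cast_injective hac)]
  refine Finset.sum_congr rfl ?_
  intro i hi
  show pvSsum (i : Int) 1 (d.getD (i : Int) PySem.Dict.empty).items = _
  rw [hbox ((i : Nat) : Int)]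

-- B's single counting pass over the flat lens list equals the per-box sums
theorem pvFoldCount (items : List (String × Int)) : ∀ (t : Int) (c : List Int),
    c.length = 256 →
    (items.foldl
      (fun (st : Int × List Int) p =>
        let b := hash_value p.1
        let cc := st.2.getD b.toNat 0 + 1
        (st.1 + (b + 1) * cc * p.2, st.2.set b.toNat cc)) (t, c)).1
      = t + ∑ j ∈ Finset.range 256,
          pvSsum ((j : Nat) : Int) (c.getD j 0 + 1) (pvBoxOf ((j : Nat) : Int) items) := by
  induction items with
  | nil =>
      intro t c _
      simp [pvBoxOf, pvSsum]
  | cons x rest ih =>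
      intro t c hc
      have hb0 := pvHash_nonneg x.1
      have hb1 := pvHash_lt x.1
      set b := hash_value x.1 with hbdef
      set n := b.toNat with hndef
      have hn : n < 256 := by omega
      have hbn : ((n : Nat) : Int) = b := Int.toNat_of_nonneg hb0
      have hnr : n ∈ Finset.range 256 := Finset.mem_range.mpr hn
      have hlen : (c.set n (c.getD n 0 + 1)).length = 256 := by simp [hc]
      rw [List.foldl_cons]
      show (rest.foldl _ (t + (b + 1) * (c.getD n 0 + 1) * x.2, c.set n (c.getD n 0 + 1))).1 = _
      rw [ih _ _ hlen]
      rw [← Finset.add_sum_erase _ _ hnr, ← Finset.add_sum_erase _ (fun j =>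
        pvSsum ((j : Nat) : Int) (c.getD j 0 + 1) (pvBoxOf ((j : Nat) : Int) (x :: rest))) hnr]
      have hset_self : (c.set n (c.getD n 0 + 1)).getD n 0 = c.getD n 0 + 1 := by
        simp [List.getD_eq_getElem?_getD, List.getElem?_set_self (show n < c.length by omega)]
      have hfilt_self : pvBoxOf ((n : Nat) : Int) (x :: rest)
          = x :: pvBoxOf ((n : Nat) : Int) rest := by
        simp only [pvBoxOf, List.filter_cons]
        rw [show (hash_value x.1 == ((n : Nat) : Int)) = true from by
          rw [hbn]; exact beq_iff_eq.mpr hbdef.symm]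
        rfl
      have herase : ∀ j ∈ (Finset.range 256).erase n,
          pvSsum ((j : Nat) : Int) ((c.set n (c.getD n 0 + 1)).getD j 0 + 1)
              (pvBoxOf ((j : Nat) : Int) rest)
            = pvSsum ((j : Nat) : Int) (c.getD j 0 + 1) (pvBoxOf ((j : Nat) : Int) (x :: rest)) := by
        intro j hj
        have hjn : j ≠ n := (Finset.mem_erase.mp hj).1
        have hset_ne : (c.set n (c.getD n 0 + 1)).getD j 0 = c.getD j 0 := by
          simp [List.getD_eq_getElem?_getD, List.getElem?_set_ne (fun he => hjn he.symm)]
        have hfilt_ne : pvBoxOf ((j : Nat) : Int) (x :: rest) = pvBoxOf ((j : Nat) : Int) rest := by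
          simp only [pvBoxOf, List.filter_cons]
          rw [show (hash_value x.1 == ((j : Nat) : Int)) = false from by
            simp only [beq_eq_false_iff_ne, ne_eq, ← hbdef]
            intro he
            exact hjn (by omega)]
          rfl
        rw [hset_ne, hfilt_ne]
      rw [Finset.sum_congr rfl herase, hset_self, hfilt_self, hbn]
      show t + (b + 1) * (c.getD n 0 + 1) * x.2 + (pvSsum b (c.getD n 0 + 1 + 1) _ + _)
        = t + ((b + 1) * (c.getD n 0 + 1) * x.2 + pvSsum b (c.getD n 0 + 1 + 1) _ + _)
      ring

-- ===== VERDICT (by name: the statement is the Claim_ definition above) =====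
theorem part_two_spec : Claim_equal_part_two := by
  intro steps _ _
  show part_two steps = part_two_alt steps
  simp only [part_two, part_two_alt]
  have hInv := pvInv_foldl steps PySem.Dict.empty PySem.Dict.empty pvInv_init
  rw [pvOuterA, pvKeysSum _ _ hInv, pvFoldCount _ 0 (List.replicate 256 0) (by rw [List.length_replicate])]
  have hrep : ∀ j ∈ Finset.range 256, pvSsum ((j : Nat) : Int)
      ((List.replicate 256 (0:Int)).getD j 0 + 1)
      (pvBoxOf ((j : Nat) : Int) ((steps.foldl pvStepB PySem.Dict.empty).items))
    = pvSsum ((j : Nat) : Int) 1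
      (pvBoxOf ((j : Nat) : Int) ((steps.foldl pvStepB PySem.Dict.empty).items)) := by
    intro j hj
    have : (List.replicate 256 (0:Int)).getD j 0 = 0 := by
      rw [List.getD_eq_getElem?_getD, List.getElem?_replicate]
      split <;> rfl
    rw [this]
    norm_num
  rw [Finset.sum_congr rfl hrep]
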